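-- pv_equiv track=rewrite | github.com/wwPDB/py-wwpdb_apps_ann_tasks_v2 | wwpdb/apps/ann_tasks_v2/assembly/AssemblyInput.py | __setSelectText
-- ===== SOURCE A (Python) =====
-- def __setSelectText(optionList, selectedValue="author_defined_assembly"):
--     oL = []
--     pSelectList = ["false" for p in optionList]
--     if selectedValue is not None and len(selectedValue) > 1:
--         optionListU = [p.upper() for p in optionList]
--         selectedValueU = selectedValue.upper()
--         try:
--             idx = optionListU.index(selectedValueU)
--             pSelectList[idx] = "true"
--         except ValueError:
--             idx = -1
--     tL = []
--     for pt, psel in zip(optionList, pSelectList):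
--         tL.append('{"value":"%s","label":"%s","selected":%s}' % (pt, pt, psel))
--     oL.append("[")
--     oL.append(",".join(tL))
--     oL.append("]")
--
--     return "".join(oL)
-- ===== SOURCE B (Python) =====
-- def __setSelectText(optionList, selectedValue="author_defined_assembly"):
--     guard = selectedValue is not None and len(selectedValue) > 1
--     target = selectedValue.upper() if guard else None
--     parts = []
--     found = False
--     for opt in optionList:
--         if guard and not found and opt.upper() == target:
--             sel = "true"
--             found = True
--         else:
--             sel = "false"
--         parts.append('{"value":"%s","label":"%s","selected":%s}' % (opt, opt, sel))
--     return "[" + ",".join(parts) + "]"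
-- ===== Notes on version B (the rewrite author's own statement) =====
-- stated objective: simpler
-- what changed: Replaces the three-stage construction (all-'false' selection list, separate uppercase copy with .index search and in-place set, then a zip pass) by one loop over optionList with a 'found' flag that decides each option's selected field and emits its JSON fragment directly.
import Mathlib
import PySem

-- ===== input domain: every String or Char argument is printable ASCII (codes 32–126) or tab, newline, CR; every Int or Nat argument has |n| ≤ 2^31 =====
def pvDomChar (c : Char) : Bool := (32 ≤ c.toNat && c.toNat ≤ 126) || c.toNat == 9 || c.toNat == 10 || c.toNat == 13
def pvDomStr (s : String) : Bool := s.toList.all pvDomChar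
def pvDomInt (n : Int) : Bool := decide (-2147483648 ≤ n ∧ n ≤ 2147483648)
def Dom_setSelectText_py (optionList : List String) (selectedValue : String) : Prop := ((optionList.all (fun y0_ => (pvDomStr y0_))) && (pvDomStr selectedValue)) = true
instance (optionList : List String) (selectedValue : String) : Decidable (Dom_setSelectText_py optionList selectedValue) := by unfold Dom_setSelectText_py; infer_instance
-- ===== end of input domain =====

-- B replaces A's three-stage build (all-"false" list, .index search and set, zip pass) by one
-- loop with a 'found' flag that emits each JSON fragment directly; objective: simpler.

-- the '%'-format template, shared by both Pythons verbatim
def pvFmt (pt psel : String) : String :=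
  "{\"value\":\"" ++ pt ++ "\",\"label\":\"" ++ pt ++ "\",\"selected\":" ++ psel ++ "}"

-- ===== PORT A =====
def setSelectText_py (optionList : List String) (selectedValue : String) : String :=
  let pSelectList := optionList.map (fun _ => "false")
  let pSelectList :=
    if 1 < PySem.Str.len selectedValue then
      let optionListU := optionList.map (fun p => PySem.Str.upper p)
      let selectedValueU := PySem.Str.upper selectedValue
      match PySem.List.index? optionListU selectedValueU with
      | some idx => pSelectList.set idx "true"
      | none => pSelectList
    else pSelectList
  let tL := (optionList.zip pSelectList).foldl
      (fun acc pp => acc ++ [pvFmt pp.1 pp.2]) ([] : List String)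
  PySem.Str.join "" ["[", PySem.Str.join "," tL, "]"]

-- ===== PORT B =====
-- loop body of B's single pass: state = (emitted fragments, found flag)
def pvStepB (g : Bool) (sU : String) (st : List String × Bool) (opt : String) :
    List String × Bool :=
  if g && !st.2 && (PySem.Str.upper opt == sU) then (st.1 ++ [pvFmt opt "true"], true)
  else (st.1 ++ [pvFmt opt "false"], st.2)

def setSelectText_py_alt (optionList : List String) (selectedValue : String) : String :=
  let g : Bool := decide (1 < PySem.Str.len selectedValue)
  let sU := PySem.Str.upper selectedValue
  let st := optionList.foldl (pvStepB g sU) ([], false)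
  "[" ++ PySem.Str.join "," st.1 ++ "]"

-- ===== PRECONDITION & SPEC =====
def Spec_setSelectText_py (optionList : List String) (selectedValue : String) (out : String) : Prop := out = setSelectText_py_alt optionList selectedValue
instance (optionList : List String) (selectedValue : String) (out : String) : Decidable (Spec_setSelectText_py optionList selectedValue out) := by unfold Spec_setSelectText_py; infer_instance

-- ===== CLAIM (what is proved, stated in full; the proofs are below) =====
def Claim_equal_setSelectText_py : Prop := ∀ (optionList : List String) (selectedValue : String), Dom_setSelectText_py optionList selectedValue → Spec_setSelectText_py optionList selectedValue (setSelectText_py optionList selectedValue)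

-- ===== LEMMAS AND PROOFS =====

-- A's for-loop over the zip is a map
theorem foldl_fmt (l : List (String × String)) (acc : List String) :
    l.foldl (fun acc pp => acc ++ [pvFmt pp.1 pp.2]) acc
      = acc ++ l.map (fun pp => pvFmt pp.1 pp.2) := by
  induction l generalizing acc with
  | nil => simp
  | cons h t ih => simp [List.foldl_cons, ih]

-- zipping a list with its own all-"false" shadow
theorem zip_false_map (l : List String) :
    List.zipWith (fun x y => pvFmt x y) l (List.replicate l.length "false")
      = l.map (fun p => pvFmt p "false") := by
  induction l with
  | nil => rfl
  | cons h t ih => simp [List.replicate_succ, ih]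

-- B with the guard off emits "false" everywhere
theorem foldB_gfalse (sU : String) (l : List String) (acc : List String) (b : Bool) :
    l.foldl (pvStepB false sU) (acc, b)
      = (acc ++ l.map (fun p => pvFmt p "false"), b) := by
  induction l generalizing acc with
  | nil => simp
  | cons h t ih => simp [List.foldl_cons, pvStepB, ih]

-- B after the match was found emits "false" everywhere
theorem foldB_found (sU : String) (l : List String) (acc : List String) :
    l.foldl (pvStepB true sU) (acc, true)
      = (acc ++ l.map (fun p => pvFmt p "false"), true) := by
  induction l generalizing acc with
  | nil => simp
  | cons h t ih => simp [List.foldl_cons, pvStepB, ih]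

-- the core invariant: B's single pass computes A's index-and-set entries
theorem foldB_main (sU : String) (l : List String) (acc : List String) :
    (l.foldl (pvStepB true sU) (acc, false)).1
      = acc ++ (match PySem.List.index? (l.map (fun p => PySem.Str.upper p)) sU with
          | some idx =>
              (l.zip ((l.map (fun _ => "false")).set idx "true")).map
                (fun pp => pvFmt pp.1 pp.2)
          | none => l.map (fun p => pvFmt p "false")) := by
  induction l generalizing acc with
  | nil => simp [PySem.List.index?]
  | cons h t ih =>
    by_cases hu : PySem.Str.upper h = sU
    · rw [List.map_cons, hu, PySem.List.index?_cons_self]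
      have : pvStepB true sU (acc, false) h = (acc ++ [pvFmt h "true"], true) := by
        simp [pvStepB, hu]
      simp only [List.foldl_cons, this, foldB_found]
      simp [List.zip, zip_false_map]
    · have hne : PySem.Str.upper h ≠ sU := hu
      rw [List.map_cons, PySem.List.index?_cons_of_ne _ hne]
      have hstep : pvStepB true sU (acc, false) h = (acc ++ [pvFmt h "false"], false) := by
        simp [pvStepB, hu]
      rw [List.foldl_cons, hstep, ih]
      cases hidx : PySem.List.index? (t.map (fun p => PySem.Str.upper p)) sU with
      | none => simp
      | some i => simp [List.zip]

-- "".join(["[", m, "]"]) = "[" ++ m ++ "]"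
theorem join_brackets (m : String) :
    PySem.Str.join "" ["[", m, "]"] = "[" ++ m ++ "]" := by
  apply String.ext
  simp [PySem.Str.join, PySem.Chars.join, List.intercalate, List.intersperse,
    String.toList_append]

-- ===== VERDICT (by name: the statement is the Claim_ definition above) =====
theorem setSelectText_py_spec : Claim_equal_setSelectText_py := by
  intro optionList selectedValue _
  unfold Spec_setSelectText_py setSelectText_py setSelectText_py_alt
  rw [join_brackets]
  by_cases hg : 1 < PySem.Str.len selectedValue
  · simp only [hg, if_pos, decide_true]
    rw [foldl_fmt, foldB_main]
    cases hidx : PySem.List.index?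
        (optionList.map (fun p => PySem.Str.upper p)) (PySem.Str.upper selectedValue) with
    | none => simp [List.zip, zip_false_map]
    | some i => simp
  · simp only [hg, if_neg, decide_false, not_false_iff]
    rw [foldl_fmt, foldB_gfalse]
    simp [List.zip, zip_false_map]
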